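-- pv_equiv track=rewrite | github.com/VirtualExecutive/TrendyolMap | miner.py | isProductUrl
-- ===== SOURCE A (Python) =====
-- def isProductUrl(url):
--     numbers="0123456789"
--     if url[-1] not in numbers:
--         return False
--
--     mode=0
--     for char in url[::-1]:
--
--         if mode==0:
--
--             if char in numbers:
--                 continue
--             elif char == "-":
--                 mode=1
--                 continue
--             else:
--                 return False
--
--         elif mode==1:
--             if char =="p":
--                 mode=2
--                 continue
--             else:
--                 return False
--
--         elif mode==2:
--             if char =="-":
--                 return True
--             else:
--                 return False
--
--         else:
--             return False
--     return False
-- ===== SOURCE B (Python) =====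
-- def isProductUrl(url):
--     stripped = url.rstrip("0123456789")
--     return len(stripped) < len(url) and stripped.endswith("-p-")
-- ===== Notes on version B (the rewrite author's own statement) =====
-- stated objective: simpler
-- what changed: Replaces A's reversed character-by-character state machine with rstrip of the trailing digit run plus a single endswith check on the dash-p-dash marker.
import Mathlib
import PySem

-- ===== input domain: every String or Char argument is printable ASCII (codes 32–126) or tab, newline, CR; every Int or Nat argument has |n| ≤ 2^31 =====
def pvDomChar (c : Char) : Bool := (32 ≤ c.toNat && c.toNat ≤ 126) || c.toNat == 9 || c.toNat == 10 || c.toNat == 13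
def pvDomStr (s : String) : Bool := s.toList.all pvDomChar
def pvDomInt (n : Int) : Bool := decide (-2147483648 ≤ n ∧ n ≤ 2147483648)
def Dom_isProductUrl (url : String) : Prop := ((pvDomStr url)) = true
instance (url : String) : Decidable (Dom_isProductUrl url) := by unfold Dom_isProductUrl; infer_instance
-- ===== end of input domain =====

-- B replaces A's reversed state-machine scan with rstrip of the trailing digits plus one endswith check on the dash-p-dash marker (simpler).
-- ===== PORT A =====
-- the for-loop over url[::-1] with the 'mode' state and early returns; falling off the loop returns False
def isProductUrlLoop : List Char → Nat → Bool
  | [], _ => false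
  | c :: rest, mode =>
    if mode = 0 then
      if ("0123456789".toList.contains c) then isProductUrlLoop rest 0
      else if c = '-' then isProductUrlLoop rest 1
      else false
    else if mode = 1 then
      if c = 'p' then isProductUrlLoop rest 2
      else false
    else if mode = 2 then
      (c = '-')
    else false

def isProductUrl (url : String) : Bool :=
  let numbers := "0123456789"
  match PySem.Str.pyGet? url (-1) with
  | none => false   -- url[-1] raises IndexError on the empty string; excluded by Pre_isProductUrl
  | some c =>
    if ¬ (numbers.toList.contains c) then false
    else isProductUrlLoop url.toList.reverse 0

-- ===== PORT B =====
def isProductUrl_alt (url : String) : Bool :=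
  -- url.rstrip("0123456789"): drop the trailing run of digit characters (exact, hand-ported)
  let stripped : List Char :=
    (url.toList.reverse.dropWhile (fun c => "0123456789".toList.contains c)).reverse
  decide (stripped.length < url.toList.length) && PySem.Chars.endswith stripped "-p-".toList

-- ===== PRECONDITION & SPEC =====
-- A raises IndexError on the empty string (url[-1]); Pre_ excludes exactly that input (B returns False there).
def Pre_isProductUrl (url : String) : Prop := url ≠ ""
instance (url : String) : Decidable (Pre_isProductUrl url) := by unfold Pre_isProductUrl; infer_instance
def pvWitness_isProductUrl : String := "x-p-12"

def Spec_isProductUrl (url : String) (out : Bool) : Prop := out = isProductUrl_alt url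
instance (url : String) (out : Bool) : Decidable (Spec_isProductUrl url out) := by unfold Spec_isProductUrl; infer_instance

-- ===== CLAIM (what is proved, stated in full; the proofs are below) =====
def Claim_equal_isProductUrl : Prop := ∀ (url : String), Dom_isProductUrl url → Pre_isProductUrl url → Spec_isProductUrl url (isProductUrl url)

-- ===== LEMMAS AND PROOFS =====
set_option maxRecDepth 8000

def pvIsDig (c : Char) : Bool := "0123456789".toList.contains c

theorem loop2_eq (l : List Char) : isProductUrlLoop l 2 = ['-'].isPrefixOf l := by
  cases l with
  | nil => rfl
  | cons c rest =>
    show decide (c = '-') = _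
    by_cases h : c = '-'
    · simp [List.isPrefixOf, h]
    · simp [List.isPrefixOf, h]
      exact fun hh => absurd hh.symm h

theorem loop1_eq (l : List Char) : isProductUrlLoop l 1 = ['p', '-'].isPrefixOf l := by
  cases l with
  | nil => rfl
  | cons c rest =>
    show (if c = 'p' then isProductUrlLoop rest 2 else false) = _
    by_cases h : c = 'p'
    · simp [List.isPrefixOf, h, loop2_eq rest]
    · simp [List.isPrefixOf, h]
      exact fun hh => absurd hh.symm h

theorem loop0_eq (l : List Char) :
    isProductUrlLoop l 0 = ['-', 'p', '-'].isPrefixOf (l.dropWhile pvIsDig) := by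
  induction l with
  | nil => rfl
  | cons c rest ih =>
    show (if pvIsDig c then isProductUrlLoop rest 0
          else if c = '-' then isProductUrlLoop rest 1 else false) = _
    by_cases hd : pvIsDig c
    · rw [if_pos hd, List.dropWhile_cons_of_pos hd, ih]
    · rw [if_neg (by simp [hd]), List.dropWhile_cons_of_neg hd]
      by_cases hm : c = '-'
      · simp [hm, loop1_eq rest, List.isPrefixOf]
      · simp [List.isPrefixOf, hm]
        exact fun hh => absurd hh.symm hm

theorem isProductUrl_spec' (url : String) (h : url ≠ "") :
    isProductUrl url = isProductUrl_alt url := by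
  unfold isProductUrl isProductUrl_alt
  simp only [show (fun c => "0123456789".toList.contains c) = pvIsDig from rfl]
  have hne : url.toList ≠ [] := by
    intro hl; exact h (by cases url; simp_all)
  have hrev : url.toList.reverse ≠ [] := by simpa using hne
  obtain ⟨c, rest, hcr⟩ := List.exists_cons_of_ne_nil hrev
  have hget : PySem.Str.pyGet? url (-1) = some c := by
    have hlast : url.toList.getLast? = some c := by
      rw [← List.head?_reverse, hcr]; rfl
    simp [PySem.List.pyGet?_neg_one, hlast]
  rw [hget]
  change (if ¬ ("0123456789".toList.contains c) = true then false
      else isProductUrlLoop url.toList.reverse 0) = _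
  have hsplit : (url.toList.reverse.takeWhile pvIsDig).length
      + (url.toList.reverse.dropWhile pvIsDig).length = url.toList.length := by
    have h0 := congrArg List.length (List.takeWhile_append_dropWhile (p := pvIsDig) (l := url.toList.reverse))
    rw [List.length_append, List.length_reverse] at h0
    exact h0
  have hlen : ((url.toList.reverse.dropWhile pvIsDig).reverse.length
      < url.toList.length) ↔ (url.toList.reverse.takeWhile pvIsDig ≠ []) := by
    rw [List.length_reverse, ← List.length_pos_iff]
    omega
  have hend : PySem.Chars.endswith
      (url.toList.reverse.dropWhile pvIsDig).reverse "-p-".toList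
      = ['-', 'p', '-'].isPrefixOf (url.toList.reverse.dropWhile pvIsDig) := by
    rw [Bool.eq_iff_iff, PySem.Chars.endswith_iff, List.isPrefixOf_iff_prefix]
    change (['-', 'p', '-'] : List Char).reverse <:+ _ ↔ _
    rw [List.reverse_suffix]
  by_cases hdig : "0123456789".toList.contains c
  · have htw : url.toList.reverse.takeWhile pvIsDig ≠ [] := by
      rw [hcr, List.takeWhile_cons_of_pos (show pvIsDig c = true from hdig)]
      simp
    rw [if_neg (not_not_intro hdig), loop0_eq, decide_eq_true (hlen.mpr htw),
      Bool.true_and, hend]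
  · have htw : url.toList.reverse.takeWhile pvIsDig = [] := by
      rw [hcr, List.takeWhile_cons_of_neg (by simpa [pvIsDig] using hdig)]
    have hdec : decide ((url.toList.reverse.dropWhile pvIsDig).reverse.length
        < url.toList.length) = false := by
      apply decide_eq_false
      intro hlt
      exact (hlen.mp hlt) htw
    rw [if_pos hdig, hdec, Bool.false_and]

-- ===== VERDICT (by name: the statement is the Claim_ definition above) =====
theorem isProductUrl_spec : Claim_equal_isProductUrl := by
  intro url _ hpre
  exact isProductUrl_spec' url hpre
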